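-- pv_equiv track=rewrite | github.com/pypi-data/pypi-mirror-403 | packages/arcade-mcp/arcade_mcp-1.8.3-py3-none-any.whl/arcade_cli/formatters/base.py | is_multi_model_eval
-- ===== SOURCE A (Python) =====
-- from typing import TYPE_CHECKING, Any
--
-- EvalResults = list[list[dict[str, Any]]]
--
-- def is_multi_model_eval(results: EvalResults) -> bool:
--     """
--     Check if evaluation results contain multiple models.
--
--     Args:
--         results: Nested list of evaluation results.
--
--     Returns:
--         True if more than one unique model is present.
--     """
--     models: set[str] = set()
--     for eval_suite in results:
--         for model_results in eval_suite:
--             model = model_results.get("model", "Unknown")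
--             models.add(model)
--             if len(models) > 1:
--                 return True
--     return False
-- ===== SOURCE B (Python) =====
-- def is_multi_model_eval(results) -> bool:
--     models = [mr.get("model", "Unknown") for suite in results for mr in suite]
--     if not models:
--         return False
--     return any(m != models[0] for m in models)
-- ===== Notes on version B (the rewrite author's own statement) =====
-- stated objective: simpler
-- what changed: Replaced the accumulating set with a flatten-then-compare pass: collect all model names in one comprehension and check whether any differs from the first, instead of growing a set inside nested loops with an early return on its size.
import Mathlib
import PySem

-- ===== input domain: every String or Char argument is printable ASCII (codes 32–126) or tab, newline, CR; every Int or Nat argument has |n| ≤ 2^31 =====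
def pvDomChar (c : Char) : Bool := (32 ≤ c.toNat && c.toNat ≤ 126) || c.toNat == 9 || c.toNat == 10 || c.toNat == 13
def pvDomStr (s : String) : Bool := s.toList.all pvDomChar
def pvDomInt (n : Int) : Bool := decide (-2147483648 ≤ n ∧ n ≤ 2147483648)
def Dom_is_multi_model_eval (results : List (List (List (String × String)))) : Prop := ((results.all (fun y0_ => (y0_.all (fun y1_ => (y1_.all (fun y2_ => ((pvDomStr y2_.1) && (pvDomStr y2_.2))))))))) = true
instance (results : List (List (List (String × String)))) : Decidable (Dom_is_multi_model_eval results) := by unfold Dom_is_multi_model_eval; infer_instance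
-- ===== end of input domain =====

-- B replaces A's nested loops growing a set with a single flatten-then-compare pass
-- (collect every model name, then check whether any differs from the first); same cost, simpler.

-- ===== PORT A =====
-- model_results.get("model", "Unknown")
def pvGetModel (mr : List (String × String)) : String :=
  (PySem.Dict.mk mr).getD "model" "Unknown"

-- inner 'for model_results in eval_suite' loop: none = early 'return True'
def pvA_inner (models : PySem.Set String) (suite : List (List (String × String))) :
    Option (PySem.Set String) :=
  match suite with
  | [] => some models
  | mr :: rest =>
    let model := pvGetModel mr
    let models' := PySem.Set.add models model
    if 1 < PySem.Set.len models' then none else pvA_inner models' rest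

-- outer 'for eval_suite in results' loop
def pvA_outer (models : PySem.Set String) (rs : List (List (List (String × String)))) : Bool :=
  match rs with
  | [] => false
  | suite :: rest =>
    match pvA_inner models suite with
    | none => true
    | some models' => pvA_outer models' rest

def is_multi_model_eval (results : List (List (List (String × String)))) : Bool :=
  pvA_outer PySem.Set.empty results

-- ===== PORT B =====
def is_multi_model_eval_alt (results : List (List (List (String × String)))) : Bool :=
  let models := (results.flatMap id).map pvGetModel
  match models with
  | [] => false
  | m0 :: _ => models.any (fun m => m != m0)

-- ===== PRECONDITION & SPEC =====
def Spec_is_multi_model_eval (results : List (List (List (String × String)))) (out : Bool) : Prop := out = is_multi_model_eval_alt results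
instance (results : List (List (List (String × String)))) (out : Bool) : Decidable (Spec_is_multi_model_eval results out) := by unfold Spec_is_multi_model_eval; infer_instance

-- ===== CLAIM (what is proved, stated in full; the proofs are below) =====
def Claim_equal_is_multi_model_eval : Prop := ∀ (results : List (List (List (String × String)))), Dom_is_multi_model_eval results → Spec_is_multi_model_eval results (is_multi_model_eval results)

-- ===== LEMMAS AND PROOFS =====

-- Once the set holds one model m0, the inner loop bails out iff some model of the suite differs from m0.
theorem pvA_inner_single (m0 : String) (suite : List (List (String × String))) :
    pvA_inner [m0] suite =
      if (suite.map pvGetModel).any (fun m => m != m0) then none else some [m0] := by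
  induction suite with
  | nil => simp [pvA_inner]
  | cons mr rest ih =>
    simp only [pvA_inner, List.map_cons, List.any_cons]
    by_cases h : pvGetModel mr = m0
    · simp [h, PySem.Set.add, PySem.Set.contains, PySem.Set.len, ih]
    · simp [PySem.Set.add, PySem.Set.contains, PySem.Set.len, h]

theorem pvA_outer_single (m0 : String) (rs : List (List (List (String × String)))) :
    pvA_outer [m0] rs = ((rs.flatMap id).map pvGetModel).any (fun m => m != m0) := by
  induction rs with
  | nil => simp [pvA_outer]
  | cons suite rest ih =>
    simp only [pvA_outer, pvA_inner_single]
    by_cases h : (suite.map pvGetModel).any (fun m => m != m0) = true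
    · simp [h]
    · simp [h, ih]

theorem pvA_outer_empty (rs : List (List (List (String × String)))) :
    pvA_outer PySem.Set.empty rs =
      match (rs.flatMap id).map pvGetModel with
      | [] => false
      | m0 :: ms => ms.any (fun m => m != m0) := by
  induction rs with
  | nil => simp [pvA_outer]
  | cons suite rest ih =>
    cases suite with
    | nil =>
      simpa [pvA_outer, pvA_inner, PySem.Set.empty] using ih
    | cons mr srest =>
      simp only [pvA_outer, pvA_inner, PySem.Set.add, PySem.Set.empty, PySem.Set.contains,
        PySem.Set.len]
      simp only [List.contains_nil, Bool.false_eq_true, if_false, List.nil_append,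
        List.length_singleton]
      rw [if_neg (by norm_num), pvA_inner_single]
      by_cases h : (srest.map pvGetModel).any (fun m => m != pvGetModel mr) = true
      · simp [h, List.any_append]
      · simp only [h, if_false, Bool.false_eq_true]
        rw [pvA_outer_single]
        simp [List.any_append, h]

-- ===== VERDICT (by name: the statement is the Claim_ definition above) =====
theorem is_multi_model_eval_spec : Claim_equal_is_multi_model_eval := by
  intro results _
  unfold Spec_is_multi_model_eval is_multi_model_eval is_multi_model_eval_alt
  rw [pvA_outer_empty]
  cases h : (results.flatMap id).map pvGetModel with
  | nil => simp
  | cons m0 ms => simp
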